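-- pv_equiv track=rewrite | github.com/val09072010/funny_race | race.py | _velocity_map
-- ===== SOURCE A (Python) =====
-- def _velocity_map(l_track: list[int]) -> list:
--     if not (l_track and isinstance(l_track, list)):
--         return []
--     change_points = []
--     try:
--         for i, cell in enumerate(l_track):
--             if cell == -1:
--                 change_points.append(i)
--         res = [0] * len(l_track)
--         for i, v in enumerate(change_points[:-1]):
--             res[v] = change_points[i + 1] - change_points[i]
--         res[change_points[-1]] = len(l_track) - change_points[-1] - 1
--         res[-2:] = [2, 1]
--         return res
--     except Exception:
--         return []
-- ===== SOURCE B (Python) =====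
-- def _velocity_map(l_track: list[int]) -> list:
--     # Single right-to-left scan: no intermediate change_points list.
--     if not (l_track and isinstance(l_track, list)) or -1 not in l_track:
--         return []
--     res = [0] * len(l_track)
--     nxt = len(l_track) - 1
--     for i, cell in reversed(list(enumerate(l_track))):
--         if cell == -1:
--             res[i] = nxt - i
--             nxt = i
--     res[-2:] = [2, 1]
--     return res
-- ===== Notes on version B (the rewrite author's own statement) =====
-- stated objective: simpler
-- what changed: Replaces the two-phase approach (collect all -1 indices into change_points, then a second indexed pass pairing consecutive entries plus a separate last-marker fixup and try/except) with one right-to-left scan that keeps only the index of the next marker to the right, writing each gap directly; the guard becomes an explicit membership test instead of a caught IndexError.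
import Mathlib
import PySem

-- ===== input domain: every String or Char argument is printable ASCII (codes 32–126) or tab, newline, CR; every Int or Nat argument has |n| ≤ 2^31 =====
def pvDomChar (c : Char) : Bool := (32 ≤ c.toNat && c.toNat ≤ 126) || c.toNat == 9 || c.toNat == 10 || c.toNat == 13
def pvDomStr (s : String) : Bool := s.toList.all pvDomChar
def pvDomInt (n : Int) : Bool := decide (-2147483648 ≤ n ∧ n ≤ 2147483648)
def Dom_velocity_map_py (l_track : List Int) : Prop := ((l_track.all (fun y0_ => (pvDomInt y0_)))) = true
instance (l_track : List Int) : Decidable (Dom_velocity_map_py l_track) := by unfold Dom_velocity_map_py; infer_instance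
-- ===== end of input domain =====

-- B replaces A's two passes (collect marker indices, then pair consecutive ones) by one
-- right-to-left scan keeping only the next marker index; same return value everywhere.

-- ===== PORT A =====
def velocity_map_py (l_track : List Int) : List Int :=
  if l_track = [] then []
  else
    -- for i, cell in enumerate(l_track): if cell == -1: change_points.append(i)
    let change_points := (PySem.List.enumerate l_track 0).foldl
      (fun acc p => if p.2 == -1 then acc ++ [p.1] else acc) []
    -- empty change_points: change_points[-1] raises IndexError, caught by `except: return []`
    if change_points = [] then []
    else
      let res := List.replicate l_track.length (0 : Int)
      -- for i, v in enumerate(change_points[:-1]): res[v] = change_points[i+1] - change_points[i]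
      let res := (PySem.List.enumerate (PySem.List.slice change_points none (some (-1))) 0).foldl
        (fun r p => PySem.List.pySetD r p.2
          (PySem.List.pyGetD change_points (p.1 + 1) 0 - PySem.List.pyGetD change_points p.1 0)) res
      -- res[change_points[-1]] = len(l_track) - change_points[-1] - 1
      let res := PySem.List.pySetD res (PySem.List.pyGetD change_points (-1) 0)
        (PySem.List.len l_track - PySem.List.pyGetD change_points (-1) 0 - 1)
      -- res[-2:] = [2, 1]
      res.take (res.length - 2) ++ [2, 1]

-- ===== PORT B =====
def velocity_map_py_alt (l_track : List Int) : List Int :=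
  if l_track = [] ∨ ¬ l_track.contains (-1) then []
  else
    let res := List.replicate l_track.length (0 : Int)
    -- for i, cell in reversed(list(enumerate(l_track))): if cell == -1: res[i] = nxt - i; nxt = i
    let s := ((PySem.List.enumerate l_track 0).reverse).foldl
      (fun (s : List Int × Int) p =>
        if p.2 == -1 then (PySem.List.pySetD s.1 p.1 (s.2 - p.1), p.1) else s)
      (res, PySem.List.len l_track - 1)
    -- res[-2:] = [2, 1]
    s.1.take (s.1.length - 2) ++ [2, 1]

-- ===== PRECONDITION & SPEC =====
def Spec_velocity_map_py (l_track : List Int) (out : List Int) : Prop := out = velocity_map_py_alt l_track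
instance (l_track : List Int) (out : List Int) : Decidable (Spec_velocity_map_py l_track out) := by unfold Spec_velocity_map_py; infer_instance

-- ===== CLAIM (what is proved, stated in full; the proofs are below) =====
def Claim_equal_velocity_map_py : Prop := ∀ (l_track : List Int), Dom_velocity_map_py l_track → Spec_velocity_map_py l_track (velocity_map_py l_track)

-- ===== LEMMAS AND PROOFS =====

-- B's state step on a marker index, and its run over a list of indices
def revStep (s : List Int × Int) (i : Int) : List Int × Int :=
  (PySem.List.pySetD s.1 i (s.2 - i), i)

def revRun (u : List Int) (s : List Int × Int) : List Int × Int := u.foldl revStep s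

-- A's step on a consecutive pair of marker indices
def pairStep (r : List Int) (q : Int × Int) : List Int :=
  PySem.List.pySetD r q.1 (q.2 - q.1)

theorem pySetD_comm (xs : List Int) (a b v w : Int) (hab : a ≠ b) (ha : 0 ≤ a) (hb : 0 ≤ b) :
    PySem.List.pySetD (PySem.List.pySetD xs a v) b w
      = PySem.List.pySetD (PySem.List.pySetD xs b w) a v := by
  rw [PySem.List.pySetD_of_nonneg _ _ hb, PySem.List.pySetD_of_nonneg _ _ ha,
      PySem.List.pySetD_of_nonneg _ _ ha, PySem.List.pySetD_of_nonneg _ _ hb]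
  exact List.set_comm _ _ (by omega)

theorem revRun_append (u : List Int) (a : Int) (s : List Int × Int) :
    revRun (u ++ [a]) s = revStep (revRun u s) a := by
  simp [revRun, List.foldl_append]

theorem revRun_snd_cons (a : Int) (t : List Int) (s : List Int × Int) :
    (revRun ((a :: t).reverse) s).2 = a := by
  rw [List.reverse_cons, revRun_append]
  rfl

theorem revRun_set_comm (u : List Int) (s : List Int × Int) (a v : Int)
    (ha : 0 ≤ a) (hu : ∀ j ∈ u, 0 ≤ j ∧ a ≠ j) :
    PySem.List.pySetD (revRun u s).1 a v = (revRun u (PySem.List.pySetD s.1 a v, s.2)).1 := by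
  induction u generalizing s with
  | nil => rfl
  | cons j t ih =>
    have hj := hu j (by simp)
    have ht : ∀ x ∈ t, 0 ≤ x ∧ a ≠ x := fun x hx => hu x (by simp [hx])
    show PySem.List.pySetD (revRun t (revStep s j)).1 a v = _
    rw [ih (revStep s j) ht]
    simp only [revStep]
    rw [pySetD_comm _ _ _ _ _ hj.2.symm hj.1 ha]
    rfl

-- the core: A's pair-fold plus last-marker write = B's right-to-left run
theorem main_run (cps : List Int) (res : List Int) (n : Int) (h : cps ≠ [])
    (hp : cps.Pairwise (· < ·)) (hn : ∀ i ∈ cps, 0 ≤ i) :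
    PySem.List.pySetD ((cps.zip cps.tail).foldl pairStep res) (cps.getLast h)
        (n - cps.getLast h - 1)
      = (revRun cps.reverse (res, n - 1)).1 := by
  induction cps generalizing res with
  | nil => exact absurd rfl h
  | cons a t ih =>
    cases t with
    | nil =>
      simp only [List.zip, List.getLast]
      rw [List.reverse_cons, List.reverse_nil, List.nil_append]
      show PySem.List.pySetD res a (n - a - 1) = (revStep (res, n - 1) a).1
      simp only [revStep]
      congr 1
      ring
    | cons b t' =>
      have hp' : (b :: t').Pairwise (· < ·) := hp.of_cons
      have hn' : ∀ i ∈ b :: t', 0 ≤ i := fun i hi => hn i (by simp [hi])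
      have hab : ∀ j ∈ b :: t', a < j := fun j hj => (List.pairwise_cons.mp hp).1 j hj
      have hzip : (a :: b :: t').zip (a :: b :: t').tail
          = (a, b) :: ((b :: t').zip (b :: t').tail) := rfl
      have hlast : (a :: b :: t').getLast h = (b :: t').getLast (by simp) :=
        List.getLast_cons _
      rw [hzip, hlast, List.foldl_cons]
      rw [ih (pairStep res (a, b)) (by simp) hp' hn']
      conv_rhs => rw [List.reverse_cons, revRun_append]
      have hsnd : (revRun ((b :: t').reverse) (res, n - 1)).2 = b :=
        revRun_snd_cons b t' (res, n - 1)
      show _ = PySem.List.pySetD (revRun ((b :: t').reverse) (res, n - 1)).1 a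
          ((revRun ((b :: t').reverse) (res, n - 1)).2 - a)
      rw [hsnd]
      rw [revRun_set_comm ((b :: t').reverse) (res, n - 1) a (b - a)
        (hn a (by simp))
        (by intro j hj
            rw [List.mem_reverse] at hj
            exact ⟨hn' j hj, by have := hab j hj; omega⟩)]
      rfl

-- the marker list both ports are about
def markers (l : List Int) : List Int :=
  ((PySem.List.enumerate l 0).filter (fun p => p.2 == -1)).map (fun p => p.1)

theorem markers_eq_foldl (l : List Int) :
    (PySem.List.enumerate l 0).foldl
      (fun acc p => if p.2 == -1 then acc ++ [p.1] else acc) [] = markers l := by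
  rw [PySem.List.foldl_append_if]
  rfl

theorem markers_nonneg (l : List Int) : ∀ i ∈ markers l, 0 ≤ i := by
  intro i hi
  simp only [markers, List.mem_map, List.mem_filter] at hi
  obtain ⟨p, ⟨hp, _⟩, rfl⟩ := hi
  rw [PySem.List.mem_enumerate_iff] at hp
  obtain ⟨k, _, rfl⟩ := hp
  simp

theorem markers_pairwise (l : List Int) : (markers l).Pairwise (· < ·) := by
  have h := PySem.List.pairwise_lt_enumerate l 0
  exact List.pairwise_map.mpr (List.Pairwise.sublist List.filter_sublist h)

theorem markers_eq_nil_iff (l : List Int) : markers l = [] ↔ ¬ (-1 : Int) ∈ l := by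
  simp only [markers, List.map_eq_nil_iff, List.filter_eq_nil_iff]
  constructor
  · intro h hc
    have hm : (-1 : Int) ∈ (PySem.List.enumerate l 0).map (fun p => p.2) := by
      rw [PySem.List.map_snd_enumerate]; exact hc
    obtain ⟨p, hp, hp2⟩ := List.mem_map.mp hm
    exact h p hp (by simp [hp2])
  · intro h p hp hm
    apply h
    have hmem : p.2 ∈ (PySem.List.enumerate l 0).map (fun p => p.2) := List.mem_map_of_mem hp
    rw [PySem.List.map_snd_enumerate] at hmem
    rwa [beq_iff_eq.mp hm] at hmem

-- A's indexed loop over enumerate(change_points[:-1]) traverses exactly the consecutive pairs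
theorem enum_dropLast_map_eq_zip (cps : List Int) :
    (PySem.List.enumerate cps.dropLast 0).map
        (fun p => (p.2, PySem.List.pyGetD cps (p.1 + 1) 0)) = cps.zip cps.tail := by
  apply List.ext_getElem
  · simp only [List.length_map, PySem.List.length_enumerate, List.length_dropLast,
      List.length_zip, List.length_tail]
    omega
  · intro k h1 h2
    have hk : k < cps.length - 1 := by
      simpa [PySem.List.length_enumerate] using h1
    have hk1 : k + 1 < cps.length := by omega
    simp only [List.getElem_map, PySem.List.getElem_enumerate, List.getElem_zip,
      List.getElem_dropLast, List.getElem_tail]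
    have hcast : (0 : Int) + (k : Int) + 1 = ((k + 1 : Nat) : Int) := by push_cast; ring
    rw [hcast, PySem.List.pyGetD_natCast, List.getD_eq_getElem _ _ hk1]

-- A's res-loop equals the zip fold
theorem a_loop_eq_zip_fold (cps : List Int) (res : List Int) :
    (PySem.List.enumerate (PySem.List.slice cps none (some (-1))) 0).foldl
        (fun r p => PySem.List.pySetD r p.2
          (PySem.List.pyGetD cps (p.1 + 1) 0 - PySem.List.pyGetD cps p.1 0)) res
      = (cps.zip cps.tail).foldl pairStep res := by
  rw [PySem.List.slice_to_neg_one]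
  have hcongr : (PySem.List.enumerate cps.dropLast 0).foldl
      (fun r p => PySem.List.pySetD r p.2
        (PySem.List.pyGetD cps (p.1 + 1) 0 - PySem.List.pyGetD cps p.1 0)) res
      = (PySem.List.enumerate cps.dropLast 0).foldl
      (fun r p => pairStep r (p.2, PySem.List.pyGetD cps (p.1 + 1) 0)) res := by
    apply PySem.List.foldl_congr_mem
    intro r p hp
    rw [PySem.List.mem_enumerate_iff] at hp
    obtain ⟨k, hk, rfl⟩ := hp
    have hk' : k < cps.length := by
      simp only [List.length_dropLast] at hk; omega
    simp only [pairStep]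
    congr 1
    have hc : (0 : Int) + (k : Int) = ((k : Nat) : Int) := by ring
    rw [hc, PySem.List.pyGetD_natCast, List.getD_eq_getElem _ _ hk',
        List.getElem_dropLast]
  rw [hcongr, ← enum_dropLast_map_eq_zip cps, List.foldl_map]

-- B's fold over reversed enumerate equals revRun over the reversed marker list
theorem b_loop_eq_revRun (l : List Int) (s : List Int × Int) :
    ((PySem.List.enumerate l 0).reverse).foldl
        (fun (s : List Int × Int) p =>
          if p.2 == -1 then (PySem.List.pySetD s.1 p.1 (s.2 - p.1), p.1) else s) s
      = revRun (markers l).reverse s := by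
  rw [PySem.List.foldl_if_eq_foldl_filter]
  rw [List.filter_reverse]
  show _ = (((PySem.List.enumerate l 0).filter (fun p => p.2 == -1)).map (fun p => p.1)).reverse.foldl revStep s
  rw [← List.map_reverse, List.foldl_map]
  rfl

theorem getLast_markers_eq_pyGetD (l : List Int) (h : markers l ≠ []) :
    PySem.List.pyGetD (markers l) (-1) 0 = (markers l).getLast h :=
  PySem.List.pyGetD_neg_one _ 0 h

-- ===== VERDICT (by name: the statement is the Claim_ definition above) =====
theorem velocity_map_py_spec : Claim_equal_velocity_map_py := by
  intro l _
  show velocity_map_py l = velocity_map_py_alt l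
  unfold velocity_map_py velocity_map_py_alt
  by_cases hnil : l = []
  · simp [hnil]
  · simp only [hnil, if_false, false_or]
    rw [markers_eq_foldl]
    by_cases hm : markers l = []
    · rw [if_pos hm, if_pos]
      intro hc
      exact (markers_eq_nil_iff l).mp hm (List.contains_iff_mem.mp hc)
    · rw [if_neg hm, if_neg]
      swap
      · intro h
        exact hm ((markers_eq_nil_iff l).mpr (fun hmem => h (List.contains_iff_mem.mpr hmem)))
      · rw [a_loop_eq_zip_fold, b_loop_eq_revRun, getLast_markers_eq_pyGetD l hm,
            PySem.List.len_eq]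
        rw [main_run (markers l) (List.replicate l.length 0) (l.length : Int) hm
          (markers_pairwise l) (markers_nonneg l)]
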